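-- pv_equiv track=rewrite | github.com/pronttera2024/fyntrix-backend | app/services/news_aggregator.py | _is_market_moving_text
-- ===== SOURCE A (Python) =====
-- _MARKET_POSITIVE_KEYWORDS = [
--     "market",
--     "markets",
--     "stock",
--     "stocks",
--     "equity",
--     "equities",
--     "nifty",
--     "sensex",
--     "index",
--     "indices",
--     "ipo",
--     "listing",
--     "earnings",
--     "results",
--     "quarter",
--     "dividend",
--     "bonus",
--     "split",
--     "buyback",
--     "merger",
--     "acquisition",
--     "deal",
--     "rbi",
--     "sebi",
--     "fed",
--     "federal reserve",
--     "central bank",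
--     "rate",
--     "rates",
--     "policy",
--     "budget",
--     "gdp",
--     "inflation",
--     "economy",
--     "economic",
--     "bond",
--     "yields",
--     "currency",
--     "rupee",
-- ]
--
-- _MARKET_NEGATIVE_KEYWORDS = [
--     "sports",
--     "cricket",
--     "football",
--     "tennis",
--     "movie",
--     "film",
--     "bollywood",
--     "hollywood",
--     "music",
--     "celebrity",
--     "lifestyle",
--     "fashion",
--     "travel",
--     "recipes",
--     "food",
-- ]
--
-- def _is_market_moving_text(title: str, description: str = "") -> bool:
--     """Heuristic filter to keep primarily market-impacting headlines.
--
--     This is deliberately conservative: we avoid obvious non-market topics and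
--     prefer items mentioning markets/economy/policy/major events. If the
--     heuristic drops too many items, the caller should fall back to the
--     unfiltered list.
--     """
--
--     text = f"{title or ''} {description or ''}".lower()
--     if not text.strip():
--         return False
--
--     # Filter out obviously irrelevant topics first
--     for bad in _MARKET_NEGATIVE_KEYWORDS:
--         if bad in text:
--             return False
--
--     # Keep headlines that clearly talk about markets/economy/policy/etc.
--     for good in _MARKET_POSITIVE_KEYWORDS:
--         if good in text:
--             return True
--
--     return False
-- ===== SOURCE B (Python) =====
-- _MARKET_POSITIVE_KEYWORDS = [
--     "market", "markets", "stock", "stocks", "equity", "equities", "nifty",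
--     "sensex", "index", "indices", "ipo", "listing", "earnings", "results",
--     "quarter", "dividend", "bonus", "split", "buyback", "merger",
--     "acquisition", "deal", "rbi", "sebi", "fed", "federal reserve",
--     "central bank", "rate", "rates", "policy", "budget", "gdp", "inflation",
--     "economy", "economic", "bond", "yields", "currency", "rupee",
-- ]
--
-- _MARKET_NEGATIVE_KEYWORDS = [
--     "sports", "cricket", "football", "tennis", "movie", "film", "bollywood",
--     "hollywood", "music", "celebrity", "lifestyle", "fashion", "travel",
--     "recipes", "food",
-- ]
--
-- _NEG = tuple(_MARKET_NEGATIVE_KEYWORDS)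
-- _POS = tuple(_MARKET_POSITIVE_KEYWORDS)
--
--
-- def _is_market_moving_text(title: str, description: str = "") -> bool:
--     # Single left-to-right scan over the text: at each position check whether
--     # a negative (dominates: immediate False) or positive keyword starts there.
--     text = f"{title or ''} {description or ''}".lower()
--     if not text.strip():
--         return False
--     found = False
--     for i in range(len(text)):
--         if text.startswith(_NEG, i):
--             return False
--         if not found and text.startswith(_POS, i):
--             found = True
--     return found
-- ===== Notes on version B (the rewrite author's own statement) =====
-- stated objective: alternative
-- what changed: Replaces A's two per-keyword substring-search loops (each keyword scanned against the whole text) by a single left-to-right scan over the text that at each position checks whether a negative or a positive keyword starts there, keeping negative-over-positive precedence.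
import Mathlib
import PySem

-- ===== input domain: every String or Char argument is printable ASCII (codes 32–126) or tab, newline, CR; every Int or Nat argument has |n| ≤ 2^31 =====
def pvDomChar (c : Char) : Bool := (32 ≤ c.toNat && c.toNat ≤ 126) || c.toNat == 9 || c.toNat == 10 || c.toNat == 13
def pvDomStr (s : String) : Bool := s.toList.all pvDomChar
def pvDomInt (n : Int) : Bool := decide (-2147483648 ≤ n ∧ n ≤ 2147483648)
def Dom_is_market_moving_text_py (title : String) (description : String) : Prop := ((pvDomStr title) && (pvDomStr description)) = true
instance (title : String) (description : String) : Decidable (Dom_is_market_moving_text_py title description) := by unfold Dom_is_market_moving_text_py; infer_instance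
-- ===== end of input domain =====

-- B replaces A's two per-keyword substring-search loops by one left-to-right scan of the
-- text that checks at each position whether a negative or positive keyword starts there
-- (objective: alternative; not measured faster).

-- ===== PORT A =====
-- module-level keyword constants shared by both ports
def pvPosKeys : List (List Char) :=
  ["market", "markets", "stock", "stocks", "equity", "equities", "nifty",
   "sensex", "index", "indices", "ipo", "listing", "earnings", "results",
   "quarter", "dividend", "bonus", "split", "buyback", "merger",
   "acquisition", "deal", "rbi", "sebi", "fed", "federal reserve",
   "central bank", "rate", "rates", "policy", "budget", "gdp", "inflation",
   "economy", "economic", "bond", "yields", "currency", "rupee"].map String.toList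

def pvNegKeys : List (List Char) :=
  ["sports", "cricket", "football", "tennis", "movie", "film", "bollywood",
   "hollywood", "music", "celebrity", "lifestyle", "fashion", "travel",
   "recipes", "food"].map String.toList

-- A's second loop: "for good in _MARKET_POSITIVE_KEYWORDS: if good in text: return True; return False"
def pvPosLoop : List (List Char) → List Char → Bool
  | [], _ => false
  | g :: gs, text => if PySem.Chars.isIn g text then true else pvPosLoop gs text

-- A's first loop: "for bad in _MARKET_NEGATIVE_KEYWORDS: if bad in text: return False", then the pos loop
def pvNegLoop : List (List Char) → List Char → Bool
  | [], text => pvPosLoop pvPosKeys text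
  | b :: bs, text => if PySem.Chars.isIn b text then false else pvNegLoop bs text

def is_market_moving_text_py (title : String) (description : String) : Bool :=
  -- f"{title or ''} {description or ''}".lower(); for a str x, `x or ''` is x itself
  let text := PySem.Chars.lower (title.toList ++ ' ' :: description.toList)
  if PySem.Chars.strip text = [] then false  -- "if not text.strip(): return False"
  else pvNegLoop pvNegKeys text

-- ===== PORT B =====
-- B's loop "for i in range(len(text)):" over text[i:] — structural recursion over the suffixes
def pvScan : List Char → Bool → Bool
  | [], found => found
  | c :: rest, found =>
    if pvNegKeys.any (fun b => PySem.Chars.startswith (c :: rest) b) then false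
    else pvScan rest
      (if !found && pvPosKeys.any (fun g => PySem.Chars.startswith (c :: rest) g) then true else found)

def is_market_moving_text_py_alt (title : String) (description : String) : Bool :=
  let text := PySem.Chars.lower (title.toList ++ ' ' :: description.toList)
  if PySem.Chars.strip text = [] then false
  else pvScan text false

-- ===== PRECONDITION & SPEC =====
def Spec_is_market_moving_text_py (title : String) (description : String) (out : Bool) : Prop := out = is_market_moving_text_py_alt title description
instance (title : String) (description : String) (out : Bool) : Decidable (Spec_is_market_moving_text_py title description out) := by unfold Spec_is_market_moving_text_py; infer_instance

-- ===== CLAIM (what is proved, stated in full; the proofs are below) =====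
def Claim_equal_is_market_moving_text_py : Prop := ∀ (title : String) (description : String), Dom_is_market_moving_text_py title description → Spec_is_market_moving_text_py title description (is_market_moving_text_py title description)

-- ===== LEMMAS AND PROOFS =====

-- "sub in (c :: rest)" = sub starts at position 0, or sub occurs in rest
theorem pv_isIn_cons (b : List Char) (c : Char) (rest : List Char) :
    PySem.Chars.isIn b (c :: rest)
      = (PySem.Chars.startswith (c :: rest) b || PySem.Chars.isIn b rest) := by
  rw [Bool.eq_iff_iff]
  simp only [Bool.or_eq_true, PySem.Chars.isIn_iff_infix,
    PySem.Chars.startswith_iff, List.infix_cons_iff]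

theorem pv_any_isIn_cons (L : List (List Char)) (c : Char) (rest : List Char) :
    L.any (fun b => PySem.Chars.isIn b (c :: rest))
      = (L.any (fun b => PySem.Chars.startswith (c :: rest) b)
          || L.any (fun b => PySem.Chars.isIn b rest)) := by
  simp only [pv_isIn_cons]
  induction L with
  | nil => simp
  | cons x xs ih =>
      simp only [List.any_cons, ih]
      cases PySem.Chars.startswith (c :: rest) x <;>
        cases PySem.Chars.isIn x rest <;> simp

theorem pv_scan_eq (s : List Char) (found : Bool) :
    pvScan s found
      = if pvNegKeys.any (fun b => PySem.Chars.isIn b s) then false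
        else (found || pvPosKeys.any (fun g => PySem.Chars.isIn g s)) := by
  induction s generalizing found with
  | nil =>
      have hn : pvNegKeys.any (fun b => PySem.Chars.isIn b []) = false := by decide
      have hp : pvPosKeys.any (fun g => PySem.Chars.isIn g []) = false := by decide
      simp [pvScan, hn, hp]
  | cons c rest ih =>
      rw [pvScan, pv_any_isIn_cons pvNegKeys, pv_any_isIn_cons pvPosKeys]
      by_cases h : pvNegKeys.any (fun b => PySem.Chars.startswith (c :: rest) b) = true
      · simp [h]
      · rw [if_neg h, ih]
        simp only [Bool.not_eq_true] at h
        simp only [h, Bool.false_or]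
        by_cases hr : pvNegKeys.any (fun b => PySem.Chars.isIn b rest) = true
        · simp [hr]
        · simp only [Bool.not_eq_true] at hr
          simp only [hr]
          cases found <;>
            cases hp : pvPosKeys.any (fun g => PySem.Chars.startswith (c :: rest) g) <;>
            simp

theorem pv_posLoop_eq (gs : List (List Char)) (text : List Char) :
    pvPosLoop gs text = gs.any (fun g => PySem.Chars.isIn g text) := by
  induction gs with
  | nil => simp [pvPosLoop]
  | cons g gs ih =>
      rw [pvPosLoop, List.any_cons]
      by_cases h : PySem.Chars.isIn g text = true <;> simp [h, ih]

theorem pv_negLoop_eq (bs : List (List Char)) (text : List Char) :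
    pvNegLoop bs text
      = if bs.any (fun b => PySem.Chars.isIn b text) then false
        else pvPosLoop pvPosKeys text := by
  induction bs with
  | nil => simp [pvNegLoop]
  | cons b bs ih =>
      rw [pvNegLoop, List.any_cons]
      by_cases h : PySem.Chars.isIn b text = true <;> simp [h, ih]

-- ===== VERDICT (by name: the statement is the Claim_ definition above) =====
theorem is_market_moving_text_py_spec : Claim_equal_is_market_moving_text_py := by
  intro title description _
  unfold Spec_is_market_moving_text_py
  unfold is_market_moving_text_py is_market_moving_text_py_alt
  set text := PySem.Chars.lower (title.toList ++ ' ' :: description.toList) with htext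
  by_cases hs : PySem.Chars.strip text = []
  · simp [hs]
  · rw [if_neg hs, if_neg hs, pv_negLoop_eq, pv_scan_eq, pv_posLoop_eq]
    by_cases h : pvNegKeys.any (fun b => PySem.Chars.isIn b text) = true <;> simp [h]
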